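-- pv_equiv track=rewrite | github.com/fabiosantoscode/blender-cloudrender | cloudrender/operators.py | viewport_divisions
-- ===== SOURCE A (Python) =====
-- def viewport_columns(width, size=10):
--     last = 0
--
--     for i in range(width // size):
--         last = (i * size) + size
--         yield (i * size, size)
--
--     if last < width:  # uneven row div
--         yield (last, width - last)
--
-- def viewport_divisions(height, width, bucket_size=10):
--     assert height > 0 and width > 0 and bucket_size > 0
--
--     last = 0
--     for row in range(height // bucket_size):
--         y = row * bucket_size
--         for x, col_width in viewport_columns(width, bucket_size):
--             last = y + bucket_size
--             yield (x, y, col_width, bucket_size)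
--
--     if last < height:
--         for x, col_width in viewport_columns(width, bucket_size):
--             yield (x, last, col_width, height - last)
-- ===== SOURCE B (Python) =====
-- def viewport_divisions(height, width, bucket_size=10):
--     assert height > 0 and width > 0 and bucket_size > 0
--
--     ncols = -(-width // bucket_size)   # ceil-division: number of tile columns
--     nrows = -(-height // bucket_size)  # number of tile rows
--     tiles = []
--     for k in range(nrows * ncols):     # one flat loop over tile indices
--         x = (k % ncols) * bucket_size
--         y = (k // ncols) * bucket_size
--         tiles.append((x, y,
--                       min(bucket_size, width - x),
--                       min(bucket_size, height - y)))
--     return tiles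
-- ===== Notes on version B (the rewrite author's own statement) =====
-- stated objective: alternative
-- what changed: B replaces A's generator pair (nested row/column loops threading a mutable 'last' plus separate remainder branches) by a single flat loop over tile indices k in range(nrows*ncols) computed with ceil-division, recovering row/column by divmod and clamping each tile's extent with min(bucket_size, remaining); there are no partition tables and no remainder cases.
import Mathlib
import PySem

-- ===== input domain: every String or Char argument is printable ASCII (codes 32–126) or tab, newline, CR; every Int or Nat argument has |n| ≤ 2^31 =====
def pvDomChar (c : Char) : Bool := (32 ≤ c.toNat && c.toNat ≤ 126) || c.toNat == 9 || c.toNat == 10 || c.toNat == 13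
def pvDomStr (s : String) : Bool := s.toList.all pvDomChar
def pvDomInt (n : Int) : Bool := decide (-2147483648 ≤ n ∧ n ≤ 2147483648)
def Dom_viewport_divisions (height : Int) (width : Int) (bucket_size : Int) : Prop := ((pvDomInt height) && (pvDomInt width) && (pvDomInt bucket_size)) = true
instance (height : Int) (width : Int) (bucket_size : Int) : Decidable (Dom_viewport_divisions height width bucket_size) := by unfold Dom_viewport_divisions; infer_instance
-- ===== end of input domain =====

-- B replaces A's generator pair (nested loops threading a mutable `last` plus remainder
-- branches) by one flat loop over tile indices with ceil-division, divmod and min.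


-- ===== PORT A =====
-- generator viewport_columns: the yielded list, with `last` threaded through the fold as in the Python
def viewport_columns (width : Int) (size : Int) : List (Int × Int) :=
  let st := (PySem.List.pyRange 0 (PySem.Int.floordiv width size) 1).foldl
    (fun (st : Int × List (Int × Int)) i => (i * size + size, st.2 ++ [(i * size, size)])) (0, [])
  if st.1 < width then st.2 ++ [(st.1, width - st.1)] else st.2

def viewport_divisions (height : Int) (width : Int) (bucket_size : Int) : List (Int × Int × Int × Int) :=
  let st := (PySem.List.pyRange 0 (PySem.Int.floordiv height bucket_size) 1).foldl
    (fun (st : Int × List (Int × Int × Int × Int)) row =>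
      let y := row * bucket_size
      (viewport_columns width bucket_size).foldl
        (fun st2 xc => (y + bucket_size, st2.2 ++ [(xc.1, y, xc.2, bucket_size)])) st)
    (0, [])
  if st.1 < height then
    st.2 ++ (viewport_columns width bucket_size).foldl
      (fun acc xc => acc ++ [(xc.1, st.1, xc.2, height - st.1)]) []
  else st.2

-- ===== PORT B =====
def viewport_divisions_alt (height : Int) (width : Int) (bucket_size : Int) : List (Int × Int × Int × Int) :=
  let ncols := -(PySem.Int.floordiv (-width) bucket_size)
  let nrows := -(PySem.Int.floordiv (-height) bucket_size)
  (PySem.List.pyRange 0 (nrows * ncols) 1).foldl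
    (fun acc k =>
      let x := PySem.Int.mod k ncols * bucket_size
      let y := PySem.Int.floordiv k ncols * bucket_size
      acc ++ [(x, y, min bucket_size (width - x), min bucket_size (height - y))]) []

-- ===== PRECONDITION & SPEC =====
-- Pre_: the Python assert raises AssertionError unless all three arguments are positive.
def Pre_viewport_divisions (height : Int) (width : Int) (bucket_size : Int) : Prop :=
  0 < height ∧ 0 < width ∧ 0 < bucket_size
instance (height : Int) (width : Int) (bucket_size : Int) : Decidable (Pre_viewport_divisions height width bucket_size) := by unfold Pre_viewport_divisions; infer_instance
def pvWitness_viewport_divisions : Int × Int × Int := (25, 17, 10)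

def Spec_viewport_divisions (height : Int) (width : Int) (bucket_size : Int) (out : List (Int × Int × Int × Int)) : Prop := out = viewport_divisions_alt height width bucket_size
instance (height : Int) (width : Int) (bucket_size : Int) (out : List (Int × Int × Int × Int)) : Decidable (Spec_viewport_divisions height width bucket_size out) := by unfold Spec_viewport_divisions; infer_instance

-- ===== CLAIM (what is proved, stated in full; the proofs are below) =====
def Claim_equal_viewport_divisions : Prop := ∀ (height : Int) (width : Int) (bucket_size : Int), Dom_viewport_divisions height width bucket_size → Pre_viewport_divisions height width bucket_size → Spec_viewport_divisions height width bucket_size (viewport_divisions height width bucket_size)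

-- ===== LEMMAS AND PROOFS =====

-- proof-only helper: the per-axis partition (full tiles plus remainder); both programs
-- are reduced to the row-major product of the two partitions.
def spans (total : Int) (size : Int) : List (Int × Int) :=
  let full := PySem.Int.floordiv total size
  let parts := (PySem.List.pyRange 0 full 1).map (fun i => (i * size, size))
  if PySem.Int.mod total size ≠ 0 then parts ++ [(full * size, total - full * size)] else parts

def grid (height : Int) (width : Int) (bucket_size : Int) : List (Int × Int × Int × Int) :=
  (spans height bucket_size).flatMap
    (fun yh => (spans width bucket_size).map (fun xw => (xw.1, yh.1, xw.2, yh.2)))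

-- A's inner column fold: `last` becomes n*size, tiles become the map over the range.
theorem col_fold (size : Int) :
    ∀ (a n l : Int) (acc : List (Int × Int)),
    (PySem.List.pyRange a n 1).foldl
      (fun (st : Int × List (Int × Int)) i => (i * size + size, st.2 ++ [(i * size, size)])) (l, acc)
    = (if a < n then n * size else l,
       acc ++ (PySem.List.pyRange a n 1).map (fun i => (i * size, size))) := by
  intro a n l acc
  by_cases h : a < n
  · generalize hkdef : (n - a).toNat = k
    induction k generalizing a l acc with
    | zero => omega
    | succ k ih =>
      rw [PySem.List.pyRange_one_cons h]
      simp only [List.foldl_cons, List.map_cons]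
      by_cases h2 : a + 1 < n
      · rw [ih (a+1) (a * size + size) (acc ++ [(a * size, size)]) h2 (by omega)]
        simp [h, h2]
      · have hae : a = n - 1 := by omega
        have hval : a * size + size = n * size := by rw [hae]; ring
        rw [PySem.List.pyRange_one_eq_nil (a := a + 1) (b := n) (by omega)]
        simp [hval, h]
  · rw [PySem.List.pyRange_one_eq_nil (by omega)]
    simp [h]

-- For positive divisors: floor quotient/remainder facts.
theorem qr_facts (t b : Int) (hb : 0 < b) :
    PySem.Int.floordiv t b * b + PySem.Int.mod t b = t ∧
    0 ≤ PySem.Int.mod t b ∧ PySem.Int.mod t b < b := by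
  refine ⟨PySem.Int.floordiv_mul_add_mod t b, ?_, ?_⟩
  · rw [PySem.Int.mod_eq_emod_of_pos hb]; exact Int.emod_nonneg t (by omega)
  · rw [PySem.Int.mod_eq_emod_of_pos hb]; exact Int.emod_lt_of_pos t hb

theorem cols_eq_spans (w b : Int) (hw : 0 < w) (hb : 0 < b) :
    viewport_columns w b = spans w b := by
  obtain ⟨heq, hr0, hrb⟩ := qr_facts w b hb
  unfold viewport_columns spans
  rw [col_fold]
  by_cases h : (0:Int) < PySem.Int.floordiv w b
  · simp only [h, if_true]
    by_cases hlt : PySem.Int.floordiv w b * b < w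
    · have : PySem.Int.mod w b ≠ 0 := by omega
      simp [hlt, this]
    · have : ¬ PySem.Int.mod w b ≠ 0 := by omega
      simp [hlt, this]
  · have h0 : PySem.Int.floordiv w b = 0 := by
      have := PySem.Int.le_floordiv_iff_mul_le (q := 0) (a := w) (b := b) hb
      omega
    rw [h0] at heq ⊢
    have hm : PySem.Int.mod w b ≠ 0 := by omega
    rw [PySem.List.pyRange_one_eq_nil (by omega)]
    simp [hw, hm]

-- A's per-row fold over a nonempty column list: `last` becomes y + b, tiles appended.
theorem row_fold (b y : Int) (cols : List (Int × Int)) (hne : cols ≠ []) :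
    ∀ (l : Int) (acc : List (Int × Int × Int × Int)),
    cols.foldl (fun (st2 : Int × List (Int × Int × Int × Int)) xc =>
        (y + b, st2.2 ++ [(xc.1, y, xc.2, b)])) (l, acc)
    = (y + b, acc ++ cols.map (fun xc => (xc.1, y, xc.2, b))) := by
  induction cols with
  | nil => simp at hne
  | cons c cs ih =>
    intro l acc
    simp only [List.foldl_cons, List.map_cons]
    cases cs with
    | nil => simp
    | cons d ds => rw [ih (by simp)]; simp

-- A's outer fold: rows stacked in order, `last` becomes m*b when any full row exists.
theorem outer_fold (b : Int) (cols : List (Int × Int)) (hne : cols ≠ []) :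
    ∀ (a m l : Int) (acc : List (Int × Int × Int × Int)),
    (PySem.List.pyRange a m 1).foldl
      (fun (st : Int × List (Int × Int × Int × Int)) row =>
        cols.foldl (fun st2 xc => (row * b + b, st2.2 ++ [(xc.1, row * b, xc.2, b)])) st)
      (l, acc)
    = (if a < m then m * b else l,
       acc ++ (PySem.List.pyRange a m 1).flatMap
         (fun row => cols.map (fun xc => (xc.1, row * b, xc.2, b)))) := by
  intro a m l acc
  by_cases h : a < m
  · generalize hkdef : (m - a).toNat = k
    induction k generalizing a l acc with
    | zero => omega
    | succ k ih =>
      rw [PySem.List.pyRange_one_cons h]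
      simp only [List.foldl_cons, List.flatMap_cons]
      rw [row_fold b (a * b) cols hne]
      by_cases h2 : a + 1 < m
      · rw [ih (a+1) (a * b + b) (acc ++ cols.map (fun xc => (xc.1, a * b, xc.2, b))) h2 (by omega)]
        simp [h, h2]
      · have hae : a = m - 1 := by omega
        have hval : a * b + b = m * b := by rw [hae]; ring
        rw [PySem.List.pyRange_one_eq_nil (a := a + 1) (b := m) (by omega)]
        simp [hval, h]
  · rw [PySem.List.pyRange_one_eq_nil (by omega)]
    simp [h]

-- a fold appending one tile per element is a map
theorem tail_fold (y hgt : Int) (cols : List (Int × Int)) :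
    ∀ (acc : List (Int × Int × Int × Int)),
    cols.foldl (fun acc xc => acc ++ [(xc.1, y, xc.2, hgt)]) acc
      = acc ++ cols.map (fun xc => (xc.1, y, xc.2, hgt)) := by
  induction cols with
  | nil => simp
  | cons c cs ih => intro acc; simp only [List.foldl_cons, List.map_cons]; rw [ih]; simp

theorem spans_ne_nil (t b : Int) (ht : 0 < t) (hb : 0 < b) : spans t b ≠ [] := by
  obtain ⟨heq, hr0, hrb⟩ := qr_facts t b hb
  unfold spans
  by_cases hm : PySem.Int.mod t b ≠ 0
  · simp [hm]
  · have hq : 0 < PySem.Int.floordiv t b := by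
      rcases lt_trichotomy (PySem.Int.floordiv t b) 0 with hlt | he | hgt
      · have := mul_neg_of_neg_of_pos hlt hb; omega
      · rw [he] at heq; simp at heq; omega
      · exact hgt
    rw [if_neg (by simp [hm])]
    rw [PySem.List.pyRange_one_cons hq]
    simp

-- A equals the partition product.
theorem A_eq_grid (h w b : Int) (hh : 0 < h) (hw : 0 < w) (hb : 0 < b) :
    viewport_divisions h w b = grid h w b := by
  unfold viewport_divisions grid
  obtain ⟨heq, hr0, hrb⟩ := qr_facts h b hb
  have hne : spans w b ≠ [] := spans_ne_nil w b hw hb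
  simp only [cols_eq_spans w b hw hb]
  rw [outer_fold b (spans w b) hne 0 (PySem.Int.floordiv h b) 0 []]
  set m := PySem.Int.floordiv h b with hm
  have hlast : (if (0:Int) < m then m * b else 0) = m * b := by
    by_cases h0 : (0:Int) < m
    · simp [h0]
    · have hm0 : m = 0 := by
        have h1 := (PySem.Int.le_floordiv_iff_mul_le (q := 0) (a := h) (b := b) hb)
        rw [← hm] at h1; omega
      simp [hm0]
  rw [hlast]
  have hspanh : spans h b
      = (PySem.List.pyRange 0 m 1).map (fun i => (i * b, b))
        ++ (if PySem.Int.mod h b ≠ 0 then [(m * b, h - m * b)] else []) := by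
    unfold spans; rw [← hm]; split_ifs <;> simp
  rw [hspanh, List.flatMap_append, List.flatMap_map]
  by_cases hrem : PySem.Int.mod h b ≠ 0
  · have hlt : m * b < h := by omega
    rw [if_pos hlt, tail_fold]
    simp [hrem]
  · have hlt : ¬ m * b < h := by omega
    rw [if_neg hlt]
    simp [hrem]

-- pin the floor quotient of a value inside a row block
theorem fd_eq (a b q : Int) (hb : 0 < b) (h1 : q * b ≤ a) (h2 : a < (q + 1) * b) :
    PySem.Int.floordiv a b = q :=
  (PySem.Int.floordiv_eq_iff_of_pos hb).2 ⟨h1, h2⟩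

-- ceiling-division of a positive total by a positive size: value and positivity
theorem ceil_spec (t b : Int) (ht : 0 < t) (hb : 0 < b) :
    (-(PySem.Int.floordiv (-t) b) - 1) * b < t ∧ t ≤ -(PySem.Int.floordiv (-t) b) * b
    ∧ 0 < -(PySem.Int.floordiv (-t) b) := by
  have h := (PySem.Int.neg_floordiv_neg_eq_iff_of_pos (a := t) (b := b)
      (q := -(PySem.Int.floordiv (-t) b)) hb).1 rfl
  refine ⟨h.1, h.2, ?_⟩
  by_contra hc
  have hc' : -(PySem.Int.floordiv (-t) b) ≤ 0 := by omega
  nlinarith [h.2]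

-- ceil in terms of floor and remainder
theorem ceil_eq (t b : Int) (ht : 0 < t) (hb : 0 < b) :
    -(PySem.Int.floordiv (-t) b)
      = PySem.Int.floordiv t b + (if PySem.Int.mod t b ≠ 0 then 1 else 0) := by
  obtain ⟨heq, hr0, hrb⟩ := qr_facts t b hb
  set q := PySem.Int.floordiv t b with hq
  rw [PySem.Int.neg_floordiv_neg_eq_iff_of_pos hb]
  split_ifs with hm
  · constructor
    · have e : (q + 1 - 1) * b = q * b := by ring
      rw [e]; omega
    · have e : (q + 1) * b = q * b + b := by ring
      rw [e]; omega
  · constructor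
    · have e : (q + 0 - 1) * b = q * b - b := by ring
      rw [e]; omega
    · have e : (q + 0) * b = q * b := by ring
      rw [e]; omega

-- the partition table written with min
theorem spans_eq_min (t b : Int) (ht : 0 < t) (hb : 0 < b) :
    spans t b
      = (PySem.List.pyRange 0 (-(PySem.Int.floordiv (-t) b)) 1).map
          (fun i => (i * b, min b (t - i * b))) := by
  obtain ⟨heq, hr0, hrb⟩ := qr_facts t b hb
  set q := PySem.Int.floordiv t b with hq
  rw [ceil_eq t b ht hb, ← hq]
  unfold spans
  rw [← hq]
  by_cases hm : PySem.Int.mod t b ≠ 0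
  · rw [if_pos hm, if_pos hm]
    have hq0 : 0 ≤ q := by nlinarith
    rw [PySem.List.pyRange_one_succ_right (by omega), List.map_append]
    congr 1
    · refine List.map_congr_left ?_
      intro i hi
      rw [PySem.List.mem_pyRange_one] at hi
      have : b ≤ t - i * b := by nlinarith
      simp [min_eq_left this]
    · have h2 : min b (t - q * b) = t - q * b := by
        apply min_eq_right; omega
      simp [h2]
  · rw [if_neg hm, if_neg hm]
    simp only [add_zero]
    refine List.map_congr_left ?_
    intro i hi
    rw [PySem.List.mem_pyRange_one] at hi
    have : b ≤ t - i * b := by nlinarith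
    simp [min_eq_left this]

-- one row block of the flat enumeration
theorem block_eq (C : Int) (hC : 0 < C) (r : Int)
    (g : Int → Int → (Int × Int × Int × Int)) :
    ∀ (m : Int), 0 ≤ m → m ≤ C →
    (PySem.List.pyRange (r * C) (r * C + m) 1).map
        (fun k => g (PySem.Int.floordiv k C) (PySem.Int.mod k C))
      = (PySem.List.pyRange 0 m 1).map (fun c => g r c) := by
  intro m hm0 hmC
  generalize hn : m.toNat = n
  induction n generalizing m with
  | zero =>
    have hmz : m = 0 := by omega
    subst hmz
    rw [PySem.List.pyRange_one_eq_nil (by omega), PySem.List.pyRange_one_eq_nil (by omega)]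
    simp
  | succ n ih =>
    have h1m : 1 ≤ m := by omega
    have e1 := PySem.List.pyRange_one_succ_right (a := r * C) (b := r * C + (m - 1)) (by linarith)
    rw [show r * C + (m - 1) + 1 = r * C + m by ring] at e1
    have e2 := PySem.List.pyRange_one_succ_right (a := 0) (b := m - 1) (by omega)
    rw [show m - 1 + 1 = m by ring] at e2
    rw [e1, e2, List.map_append, List.map_append]
    congr 1
    · exact ih (m - 1) (by omega) (by omega) (by omega)
    · have eC : (r + 1) * C = r * C + C := by ring
      have hfd : PySem.Int.floordiv (r * C + (m - 1)) C = r := by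
        apply fd_eq _ _ _ hC (by linarith) (by rw [eC]; linarith)
      have hmod : PySem.Int.mod (r * C + (m - 1)) C = m - 1 := by
        have hx := PySem.Int.floordiv_mul_add_mod (r * C + (m - 1)) C
        rw [hfd] at hx; omega
      simp [hfd, hmod]

-- the flat divmod enumeration is the row-major nested enumeration
theorem flat_eq (C : Int) (hC : 0 < C) (g : Int → Int → (Int × Int × Int × Int)) :
    ∀ (R : Int), 0 ≤ R →
    (PySem.List.pyRange 0 (R * C) 1).map
        (fun k => g (PySem.Int.floordiv k C) (PySem.Int.mod k C))
      = (PySem.List.pyRange 0 R 1).flatMap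
          (fun r => (PySem.List.pyRange 0 C 1).map (fun c => g r c)) := by
  intro R hR
  generalize hn : R.toNat = n
  induction n generalizing R with
  | zero =>
    have hRz : R = 0 := by omega
    subst hRz
    rw [show (0:Int) * C = 0 by ring]
    rw [PySem.List.pyRange_one_eq_nil (le_refl 0)]
    simp
  | succ n ih =>
    have h1R : 1 ≤ R := by omega
    have hnn : 0 ≤ (R - 1) * C := mul_nonneg (by omega) (by omega)
    have hsplit : PySem.List.pyRange 0 (R * C) 1
        = PySem.List.pyRange 0 ((R - 1) * C) 1
          ++ PySem.List.pyRange ((R - 1) * C) ((R - 1) * C + C) 1 := by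
      rw [show R * C = (R - 1) * C + C by ring]
      exact PySem.List.pyRange_one_append _ _ _ hnn (by linarith)
    rw [hsplit, List.map_append,
        ih (R - 1) (by omega) (by omega),
        block_eq C hC (R - 1) g C (by omega) (by omega)]
    have e2 := PySem.List.pyRange_one_succ_right (a := 0) (b := R - 1) (by omega)
    rw [show R - 1 + 1 = R by ring] at e2
    rw [e2]
    simp

-- a fold appending one tuple per index is a map
theorem fold_app_map (f : Int → (Int × Int × Int × Int)) (l : List Int) :
    ∀ (acc : List (Int × Int × Int × Int)),
    l.foldl (fun acc k => acc ++ [f k]) acc = acc ++ l.map f := by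
  induction l with
  | nil => simp
  | cons x xs ih => intro acc; simp only [List.foldl_cons, List.map_cons]; rw [ih]; simp

-- B equals the partition product.
theorem B_eq_grid (h w b : Int) (hh : 0 < h) (hw : 0 < w) (hb : 0 < b) :
    viewport_divisions_alt h w b = grid h w b := by
  unfold viewport_divisions_alt grid
  obtain ⟨hC1, hC2, hC⟩ := ceil_spec w b hw hb
  obtain ⟨hR1, hR2, hR⟩ := ceil_spec h b hh hb
  set C := -(PySem.Int.floordiv (-w) b) with hCdef
  set R := -(PySem.Int.floordiv (-h) b) with hRdef
  rw [fold_app_map]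
  rw [flat_eq C hC
      (fun r c => (c * b, r * b, min b (w - c * b), min b (h - r * b))) R (by omega)]
  rw [spans_eq_min h b hh hb, spans_eq_min w b hw hb, ← hCdef, ← hRdef]
  rw [List.flatMap_map]
  simp [List.map_map, Function.comp_def]

-- ===== VERDICT (by name: the statement is the Claim_ definition above) =====
theorem viewport_divisions_spec : Claim_equal_viewport_divisions := by
  intro h w b _ hpre
  obtain ⟨hh, hw, hb⟩ := hpre
  unfold Spec_viewport_divisions
  rw [A_eq_grid h w b hh hw hb, B_eq_grid h w b hh hw hb]
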